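-- pv_equiv track=rewrite | github.com/naveenmims/ai-mail-saas | backend/worker_imap.py | is_ignored_email
-- ===== SOURCE A (Python) =====
-- IGNORE_KEYWORDS = [
--     "unsubscribe", "manage preferences", "preference center", "view in browser",
--     "nurture", "campaign", "offer", "promotion", "newsletter",
--     "webinar", "join us", "register", "event", "summit",
--     "do not reply", "no reply", "noreply", "donotreply",
--     "privacy policy", "powered by", "email preferences", "mailing list",
-- ]
--
-- IGNORE_SENDERS = [
--     "no-reply", "noreply", "donotreply", "mailer-daemon", "postmaster",
--     "bounce@", "secureserver.net", "go.", "marketing@", "news@", "updates@",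
--     "sender-sib.com", "sibmail.com", "sendinblue", "brevo",
--     "sender-sib", "sendib", "mailchimp", "sendgrid.net", "campaign-", "email.",
-- ]
--
-- def is_ignored_email(text_lower: str) -> bool:
--     """
--     Pass lowercase text. Returns True if it's marketing/system based on static lists.
--     """
--     if not text_lower:
--         return False
--     if any(k in text_lower for k in IGNORE_KEYWORDS):
--         return True
--     if any(s in text_lower for s in IGNORE_SENDERS):
--         return True
--     return False
-- ===== SOURCE B (Python) =====
-- # Merged pattern list (keywords + senders), indexed by first character so that at
-- # each text position only the few patterns starting with that character are tried.
-- _PATTERNS = [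
--     "unsubscribe", "manage preferences", "preference center", "view in browser",
--     "nurture", "campaign", "offer", "promotion", "newsletter",
--     "webinar", "join us", "register", "event", "summit",
--     "do not reply", "no reply", "noreply", "donotreply",
--     "privacy policy", "powered by", "email preferences", "mailing list",
--     "no-reply", "noreply", "donotreply", "mailer-daemon", "postmaster",
--     "bounce@", "secureserver.net", "go.", "marketing@", "news@", "updates@",
--     "sender-sib.com", "sibmail.com", "sendinblue", "brevo",
--     "sender-sib", "sendib", "mailchimp", "sendgrid.net", "campaign-", "email.",
-- ]
--
-- _BY_FIRST = {}
-- for _p in _PATTERNS: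
--     _BY_FIRST.setdefault(_p[0], []).append(_p)
--
--
-- def is_ignored_email(text_lower: str) -> bool:
--     """
--     Pass lowercase text. Returns True if it's marketing/system based on static lists.
--     Single position-major pass: at each index, look up the bucket of patterns whose
--     first character is the character there, and test only those with startswith.
--     """
--     for i, ch in enumerate(text_lower):
--         for pat in _BY_FIRST.get(ch, ()):
--             if text_lower.startswith(pat, i):
--                 return True
--     return False
-- ===== Notes on version B (the rewrite author's own statement) =====
-- stated objective: alternative
-- what changed: Replaces the two pattern-major any(substring-in-text) scans with one position-major pass over the text that consults a first-character hash index built once from the merged pattern list, so at each position only the patterns starting with that character are tested with startswith; the empty-text guard falls out of the loop.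
import Mathlib
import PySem

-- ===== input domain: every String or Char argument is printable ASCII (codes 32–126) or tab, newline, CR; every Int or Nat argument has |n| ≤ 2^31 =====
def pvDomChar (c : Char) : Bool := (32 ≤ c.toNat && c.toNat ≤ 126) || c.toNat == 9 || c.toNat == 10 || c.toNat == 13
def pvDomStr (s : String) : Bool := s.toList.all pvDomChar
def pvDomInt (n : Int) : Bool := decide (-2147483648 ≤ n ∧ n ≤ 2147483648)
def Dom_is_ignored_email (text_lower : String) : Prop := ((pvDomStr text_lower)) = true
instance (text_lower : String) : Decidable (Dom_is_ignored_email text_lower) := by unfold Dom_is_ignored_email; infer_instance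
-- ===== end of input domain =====

-- B replaces A's two pattern-major substring scans with one position-major pass
-- that consults a first-character index (a dict built once from the merged list),
-- testing only the bucket's patterns at each position (alternative decomposition).


-- ===== PORT A =====
def pvIgnoreKeywords : List String := [
  "unsubscribe", "manage preferences", "preference center", "view in browser",
  "nurture", "campaign", "offer", "promotion", "newsletter",
  "webinar", "join us", "register", "event", "summit",
  "do not reply", "no reply", "noreply", "donotreply",
  "privacy policy", "powered by", "email preferences", "mailing list"]

def pvIgnoreSenders : List String := [
  "no-reply", "noreply", "donotreply", "mailer-daemon", "postmaster",
  "bounce@", "secureserver.net", "go.", "marketing@", "news@", "updates@",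
  "sender-sib.com", "sibmail.com", "sendinblue", "brevo",
  "sender-sib", "sendib", "mailchimp", "sendgrid.net", "campaign-", "email."]

def is_ignored_email (text_lower : String) : Bool :=
  if text_lower.toList = [] then false
  else if pvIgnoreKeywords.any (fun k => PySem.Str.isIn k text_lower) then true
  else if pvIgnoreSenders.any (fun s => PySem.Str.isIn s text_lower) then true
  else false

-- ===== PORT B =====
-- _PATTERNS: the merged list, written out once in Source B
def pvPatterns : List String := [
  "unsubscribe", "manage preferences", "preference center", "view in browser",
  "nurture", "campaign", "offer", "promotion", "newsletter",
  "webinar", "join us", "register", "event", "summit",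
  "do not reply", "no reply", "noreply", "donotreply",
  "privacy policy", "powered by", "email preferences", "mailing list",
  "no-reply", "noreply", "donotreply", "mailer-daemon", "postmaster",
  "bounce@", "secureserver.net", "go.", "marketing@", "news@", "updates@",
  "sender-sib.com", "sibmail.com", "sendinblue", "brevo",
  "sender-sib", "sendib", "mailchimp", "sendgrid.net", "campaign-", "email."]

-- _BY_FIRST: setdefault(p[0], []).append(p) is Dict.modify with default [];
-- p[0] is headD (every pattern is a nonempty literal)
def pvByFirst : PySem.Dict Char (List String) :=
  pvPatterns.foldl
    (fun d p => d.modify (p.toList.headD ' ') [] (fun l => l ++ [p]))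
    PySem.Dict.empty

-- inner loop: try each pattern of the bucket with startswith at this position
def pvTryBucket (suf : List Char) : List String → Bool
  | [] => false
  | pat :: rest => PySem.Chars.startswith suf pat.toList || pvTryBucket suf rest

-- outer loop: for i, ch in enumerate(text): consult the bucket of ch
def pvScan : List Char → Bool
  | [] => false
  | ch :: rest => pvTryBucket (ch :: rest) (pvByFirst.getD ch []) || pvScan rest

def is_ignored_email_alt (text_lower : String) : Bool :=
  pvScan text_lower.toList

-- ===== PRECONDITION & SPEC =====
def Spec_is_ignored_email (text_lower : String) (out : Bool) : Prop := out = is_ignored_email_alt text_lower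
instance (text_lower : String) (out : Bool) : Decidable (Spec_is_ignored_email text_lower out) := by unfold Spec_is_ignored_email; infer_instance

-- ===== CLAIM (what is proved, stated in full; the proofs are below) =====
def Claim_equal_is_ignored_email : Prop := ∀ (text_lower : String), Dom_is_ignored_email text_lower → Spec_is_ignored_email text_lower (is_ignored_email text_lower)

-- ===== LEMMAS AND PROOFS =====

lemma pvPatterns_eq : pvPatterns = pvIgnoreKeywords ++ pvIgnoreSenders := rfl

-- every pattern is a nonempty string
lemma pvPatterns_ne_nil : ∀ p ∈ pvPatterns, p.toList ≠ [] := by decide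

-- completeness of the index: every pattern is in the bucket of its first character
set_option maxRecDepth 40000 in
lemma pvByFirst_complete : ∀ p ∈ pvPatterns, p ∈ pvByFirst.getD (p.toList.headD ' ') [] := by
  decide

-- soundness of the index: any bucket of the fold contains only source patterns
-- (or what the starting dict already held)
lemma pvFold_bucket_sub (L : List String) :
    ∀ (d : PySem.Dict Char (List String)) (c : Char) (p : String),
      p ∈ (L.foldl
        (fun d p => d.modify (p.toList.headD ' ') [] (fun l => l ++ [p])) d).getD c [] →
      p ∈ L ∨ p ∈ d.getD c [] := by
  induction L with
  | nil => intro d c p h; exact Or.inr h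
  | cons q L ih =>
    intro d c p h
    rcases ih _ c p h with hL | hd
    · exact Or.inl (List.mem_cons_of_mem q hL)
    · by_cases hc : c = q.toList.headD ' '
      · subst hc
        rw [PySem.Dict.getD_modify_self] at hd
        rcases List.mem_append.1 hd with h1 | h2
        · exact Or.inr h1
        · exact Or.inl (List.mem_cons.2 (Or.inl (List.mem_singleton.1 h2)))
      · rw [PySem.Dict.getD_modify_of_ne _ _ _ hc] at hd
        exact Or.inr hd

lemma pvByFirst_sound (c : Char) (p : String) (h : p ∈ pvByFirst.getD c []) :
    p ∈ pvPatterns := by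
  rcases pvFold_bucket_sub pvPatterns PySem.Dict.empty c p h with h1 | h2
  · exact h1
  · rw [PySem.Dict.getD_empty] at h2; cases h2

lemma pvTryBucket_iff (suf : List Char) (L : List String) :
    pvTryBucket suf L = true ↔ ∃ p ∈ L, p.toList <+: suf := by
  induction L with
  | nil => simp [pvTryBucket]
  | cons pat rest ih => simp [pvTryBucket, ih, PySem.Chars.startswith_iff]

lemma pvScan_iff (l : List Char) :
    pvScan l = true ↔ ∃ p ∈ pvPatterns, p.toList <:+: l := by
  induction l with
  | nil =>
    constructor
    · intro h; simp [pvScan] at h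
    · rintro ⟨p, hp, hinf⟩
      exact absurd (List.eq_nil_of_infix_nil hinf) (pvPatterns_ne_nil p hp)
  | cons c rest ih =>
    simp only [pvScan, Bool.or_eq_true, pvTryBucket_iff, ih]
    constructor
    · rintro (⟨p, hp, hpre⟩ | ⟨p, hp, hinf⟩)
      · exact ⟨p, pvByFirst_sound c p hp, hpre.isInfix⟩
      · exact ⟨p, hp, hinf.trans (List.suffix_cons c rest).isInfix⟩
    · rintro ⟨p, hp, hinf⟩
      rcases List.infix_cons_iff.1 hinf with hpre | hinf'
      · left
        refine ⟨p, ?_, hpre⟩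
        have hhead : p.toList.headD ' ' = c := by
          rcases List.eq_nil_or_concat' p.toList with hnil | _
          · exact absurd hnil (pvPatterns_ne_nil p hp)
          · obtain ⟨t, hpre'⟩ := hpre
            cases he : p.toList with
            | nil => exact absurd he (pvPatterns_ne_nil p hp)
            | cons a as =>
              rw [he] at hpre'
              simp only [List.cons_append, List.cons.injEq] at hpre'
              simp [hpre'.1]
        rw [← hhead]
        exact pvByFirst_complete p hp
      · exact Or.inr ⟨p, hp, hinf'⟩

-- ===== VERDICT (by name: the statement is the Claim_ definition above) =====
theorem is_ignored_email_spec : Claim_equal_is_ignored_email := by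
  intro t _
  unfold Spec_is_ignored_email is_ignored_email is_ignored_email_alt
  have hch : ∀ L : List String, (L.any fun k => PySem.Str.isIn k t) = true ↔
      ∃ p ∈ L, p.toList <:+: t.toList := by
    intro L; simp [List.any_eq_true, PySem.Chars.isIn_iff_infix]
  by_cases h : t.toList = []
  · rw [if_pos h, h]; rfl
  · rw [if_neg h]
    by_cases h1 : (pvIgnoreKeywords.any fun k => PySem.Str.isIn k t) = true
    · obtain ⟨p, hp, hin⟩ := (hch pvIgnoreKeywords).1 h1
      rw [if_pos h1]
      exact ((pvScan_iff t.toList).2 ⟨p, by rw [pvPatterns_eq]; exact List.mem_append_left _ hp, hin⟩).symm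
    · by_cases h2 : (pvIgnoreSenders.any fun s => PySem.Str.isIn s t) = true
      · obtain ⟨p, hp, hin⟩ := (hch pvIgnoreSenders).1 h2
        rw [if_neg h1, if_pos h2]
        exact ((pvScan_iff t.toList).2 ⟨p, by rw [pvPatterns_eq]; exact List.mem_append_right _ hp, hin⟩).symm
      · rw [if_neg h1, if_neg h2]
        symm
        rw [Bool.eq_false_iff]
        intro hany
        obtain ⟨p, hp, hin⟩ := (pvScan_iff t.toList).1 hany
        rw [pvPatterns_eq] at hp
        rcases List.mem_append.1 hp with hk | hs
        · exact h1 ((hch pvIgnoreKeywords).2 ⟨p, hk, hin⟩)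
        · exact h2 ((hch pvIgnoreSenders).2 ⟨p, hs, hin⟩)
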